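-- pv_equiv track=rewrite | github.com/K1XE/LeetCode | CodeTop/字节/902.最大为-n-的数字组合.py | atMostNGivenDigitSet
-- ===== SOURCE A (Python) =====
-- from typing import List
--
-- def atMostNGivenDigitSet(digits: List[str], n: int) -> int:
--     m = len(digits)
--     s = str(n)
--     k = len(s)
--     dp = [[0] * 2 for _ in range(k + 1)]
--     dp[0][1] = 1
--     for i in range(1, k + 1):
--         for d in digits:
--             if d == s[i - 1]: dp[i][1] = dp[i - 1][1]
--             elif d < s[i - 1]: dp[i][0] += dp[i - 1][1]
--             else: break
--         if i > 1: dp[i][0] += m + m * dp[i - 1][0]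
--     return sum(dp[k])
-- ===== SOURCE B (Python) =====
-- from typing import List
--
-- def atMostNGivenDigitSet(digits: List[str], n: int) -> int:
--     s = str(n)
--     k = len(s)
--     m = len(digits)
--     ans = sum(m ** i for i in range(1, k))
--     for i in range(k):
--         cnt = 0
--         matched = False
--         for d in digits:
--             if d > s[i]:
--                 break
--             if d == s[i]:
--                 matched = True
--             else:
--                 cnt += 1
--         ans += cnt * m ** (k - 1 - i)
--         if not matched:
--             return ans
--     return ans + 1
-- ===== Notes on version B (the rewrite author's own statement) =====
-- stated objective: simpler
-- what changed: Replaces A's two-column DP table over dp[0..k] with the closed-form digit count: a power-sum for all shorter lengths plus a single prefix-match scan over str(n) that adds cnt*m**(k-1-i) per position and returns early at the first unmatched position (+1 if every position matches).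
import Mathlib
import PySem

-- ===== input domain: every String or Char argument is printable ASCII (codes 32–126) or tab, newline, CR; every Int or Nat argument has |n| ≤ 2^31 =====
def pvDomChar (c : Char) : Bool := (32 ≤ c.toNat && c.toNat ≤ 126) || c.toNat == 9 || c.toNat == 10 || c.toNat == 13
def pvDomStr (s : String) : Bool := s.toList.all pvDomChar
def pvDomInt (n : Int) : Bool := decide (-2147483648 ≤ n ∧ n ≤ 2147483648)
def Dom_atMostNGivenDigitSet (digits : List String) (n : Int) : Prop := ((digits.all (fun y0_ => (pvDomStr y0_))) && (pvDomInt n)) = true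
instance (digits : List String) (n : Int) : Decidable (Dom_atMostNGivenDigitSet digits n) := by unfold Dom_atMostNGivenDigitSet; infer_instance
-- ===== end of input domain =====

-- B replaces A's two-column DP table with the closed-form digit count (power sums for
-- shorter lengths plus a prefix-match scan with early exit); objective: simpler, same cost.

-- ===== PORT A =====
-- A's inner `for d in digits` loop (break = return the state); state is (dp[i][1], dp[i][0]),
-- p1 = dp[i-1][1].  Python's string compare d < s[i-1] is code-point lexicographic, exactly
-- `<` on the underlying List Char (see PYSEM.md, str COMPARISON).
def pvScanA (c : Char) (p1 : Int) : List String → Int × Int → Int × Int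
  | [], st => st
  | d :: rest, (v1, v0) =>
      if d.toList = [c] then pvScanA c p1 rest (p1, v0)
      else if d.toList < [c] then pvScanA c p1 rest (v1, v0 + p1)
      else (v1, v0)

-- A's outer `for i in range(1, k+1)` loop over the characters of s, carrying the previous
-- dp row (dp[i-1][1], dp[i-1][0]) — the only row A's code ever reads; `first` is `i == 1`.
def pvLoopA (digits : List String) (m : Int) : List Char → Bool → Int × Int → Int × Int
  | [], _, st => st
  | c :: rest, first, (p1, p0) =>
      let t := pvScanA c p1 digits (0, 0)
      pvLoopA digits m rest false (t.1, if first then t.2 else t.2 + m + m * p0)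

def atMostNGivenDigitSet (digits : List String) (n : Int) : Int :=
  let m : Int := digits.length
  let s := (PySem.Int.toStr n).toList
  let r := pvLoopA digits m s true (1, 0)
  r.2 + r.1          -- sum(dp[k])

-- ===== PORT B =====
-- B's inner scan at one position: count digits < s[i], flag a digit == s[i], break at the
-- first digit > s[i] (`d > s[i]` is `[c] < d.toList`).
def pvScanB (c : Char) : List String → Int × Bool → Int × Bool
  | [], st => st
  | d :: rest, (cnt, matched) =>
      if [c] < d.toList then (cnt, matched)
      else if d.toList = [c] then pvScanB c rest (cnt, true)
      else pvScanB c rest (cnt + 1, matched)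

-- B's `for i in range(k)` loop: add cnt * m**(k-1-i), return early on a mismatched prefix,
-- + 1 when every position matched.
def pvLoopB (digits : List String) (m k : Int) : List Char → Int → Int → Int
  | [], _, ans => ans + 1
  | c :: rest, i, ans =>
      let p := pvScanB c digits (0, false)
      let ans' := ans + p.1 * m ^ (k - 1 - i).toNat
      if p.2 then pvLoopB digits m k rest (i + 1) ans' else ans'

def atMostNGivenDigitSet_alt (digits : List String) (n : Int) : Int :=
  let s := (PySem.Int.toStr n).toList
  let k : Int := s.length
  let m : Int := digits.length
  let ans := (PySem.List.pyRange 1 k 1).foldl (fun a i => a + m ^ i.toNat) 0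
  pvLoopB digits m k s 0 ans

-- ===== PRECONDITION & SPEC =====
def Spec_atMostNGivenDigitSet (digits : List String) (n : Int) (out : Int) : Prop := out = atMostNGivenDigitSet_alt digits n
instance (digits : List String) (n : Int) (out : Int) : Decidable (Spec_atMostNGivenDigitSet digits n out) := by unfold Spec_atMostNGivenDigitSet; infer_instance

-- ===== CLAIM (what is proved, stated in full; the proofs are below) =====
def Claim_equal_atMostNGivenDigitSet : Prop := ∀ (digits : List String) (n : Int), Dom_atMostNGivenDigitSet digits n → Spec_atMostNGivenDigitSet digits n (atMostNGivenDigitSet digits n)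

-- ===== LEMMAS AND PROOFS =====

-- sum(m ** i for i in range(1, k)) : count of all shorter lengths 1..l
def pvSpow (m : Int) : Nat → Int
  | 0 => 0
  | l + 1 => pvSpow m l + m ^ (l + 1)

theorem pvFoldRangeAux (m : Int) (j : Nat) (acc : Int) :
    List.foldl (fun a i => a + m ^ i.toNat) acc
        ((List.range j).map (fun k : Nat => (1 : Int) + (k : Int)))
      = acc + pvSpow m j := by
  induction j generalizing acc with
  | zero => simp [pvSpow]
  | succ l ih =>
      rw [List.range_succ, List.map_append, List.foldl_append, ih]
      have h2 : ((1 : Int) + (l : Int)).toNat = l + 1 := by omega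
      simp only [List.map_cons, List.map_nil, List.foldl_cons, List.foldl_nil, h2, pvSpow]
      ring

theorem pvFoldRange (m : Int) (j : Nat) (acc : Int) :
    (PySem.List.pyRange 1 ((j : Int) + 1) 1).foldl (fun a i => a + m ^ i.toNat) acc
      = acc + pvSpow m j := by
  have h : ((j : Int) + 1 - 1).toNat = j := by omega
  rw [PySem.List.pyRange_one, h]
  exact pvFoldRangeAux m j acc

-- pvScanB's accumulator is additive in cnt, monotone in matched
theorem pvScanB_acc (c : Char) (ds : List String) (cnt : Int) (b : Bool) :
    pvScanB c ds (cnt, b)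
      = (cnt + (pvScanB c ds (0, false)).1, b || (pvScanB c ds (0, false)).2) := by
  induction ds generalizing cnt b with
  | nil => simp [pvScanB]
  | cons d rest ih =>
      simp only [pvScanB]
      by_cases h1 : [c] < d.toList
      · simp [h1]
      · by_cases h2 : d.toList = [c]
        · simp only [if_neg h1, if_pos h2]
          rw [ih cnt true, ih 0 true]
          simp
        · simp only [if_neg h1, if_neg h2]
          rw [ih (cnt + 1) b, ih (0 + 1) false]
          simp only [Prod.mk.injEq, Bool.false_or]
          constructor <;> first | ring | rfl | trivial

-- A's inner digit loop expressed through B's inner scan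
theorem pvScanA_eq (c : Char) (ds : List String) (p1 v1 v0 : Int) :
    pvScanA c p1 ds (v1, v0)
      = ((if (pvScanB c ds (0, false)).2 then p1 else v1),
         v0 + (pvScanB c ds (0, false)).1 * p1) := by
  induction ds generalizing v1 v0 with
  | nil => simp [pvScanA, pvScanB]
  | cons d rest ih =>
      simp only [pvScanA, pvScanB]
      by_cases h2 : d.toList = [c]
      · have h1 : ¬ [c] < d.toList := by rw [h2]; exact lt_irrefl _
        simp only [if_pos h2, if_neg h1]
        rw [ih p1 v0, pvScanB_acc c rest 0 true]
        simp
      · by_cases h3 : d.toList < [c]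
        · have h1 : ¬ [c] < d.toList := not_lt_of_gt h3
          simp only [if_neg h2, if_pos h3, if_neg h1]
          rw [ih v1 (v0 + p1), pvScanB_acc c rest (0 + 1) false]
          simp only [Prod.mk.injEq, Bool.false_or]
          constructor <;> first | ring | rfl | trivial
        · have h1 : [c] < d.toList := by
            rcases lt_trichotomy d.toList [c] with h | h | h
            exacts [absurd h h3, absurd h h2, h]
          simp only [if_neg h2, if_neg h3, if_pos h1]
          simp

-- after a prefix mismatch (dp[i-1][1] = 0) A's remaining rows follow p0 := m + m*p0
theorem pvLoopA_dead (digits : List String) (m : Int) (cs : List Char) (p0 : Int) :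
    pvLoopA digits m cs false (0, p0)
      = (0, m ^ cs.length * p0 + pvSpow m cs.length) := by
  induction cs generalizing p0 with
  | nil => simp [pvLoopA, pvSpow]
  | cons c rest ih =>
      simp only [pvLoopA, pvScanA_eq, ite_self, mul_zero, add_zero, zero_add]
      rw [ih]
      simp only [List.length_cons, pvSpow, pow_succ, Prod.mk.injEq]
      refine ⟨trivial, ?_⟩
      split_ifs <;> first | exact (False.elim (by assumption)) | (exfalso; exact Bool.false_ne_true (by assumption)) | ring

-- matched phase: A's dp row (1, p0) against B's running answer at position i = k - |cs|
theorem pvLoop_main (digits : List String) (m k : Int) (cs : List Char) (p0 ans i : Int)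
    (hi : i = k - (cs.length : Int))
    (ha : ans = m ^ cs.length * p0 + pvSpow m cs.length) :
    (pvLoopA digits m cs false (1, p0)).2 + (pvLoopA digits m cs false (1, p0)).1
      = pvLoopB digits m k cs i ans := by
  induction cs generalizing p0 ans i with
  | nil =>
      simp only [pvLoopA, pvLoopB, List.length_nil, pow_zero, one_mul, pvSpow] at ha ⊢
      omega
  | cons c rest ih =>
      have he : (k - 1 - i).toNat = rest.length := by
        simp only [List.length_cons] at hi; omega
      simp only [pvLoopA, pvLoopB, pvScanA_eq, he]
      by_cases hM : (pvScanB c digits (0, false)).2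
      · simp only [if_pos hM]
        apply ih
        · simp only [List.length_cons] at hi; omega
        · rw [ha]
          simp only [List.length_cons, pvSpow, pow_succ]
          split_ifs <;> first | exact (False.elim (by assumption)) | (exfalso; exact Bool.false_ne_true (by assumption)) | ring
      · simp only [if_neg hM, pvLoopA_dead]
        rw [ha]
        simp only [List.length_cons, pvSpow, pow_succ]
        split_ifs <;> first | exact (False.elim (by assumption)) | (exfalso; exact Bool.false_ne_true (by assumption)) | ring

theorem pvMainAux (digits : List String) (m : Int) (s : List Char) :
    (pvLoopA digits m s true (1, 0)).2 + (pvLoopA digits m s true (1, 0)).1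
      = pvLoopB digits m (s.length : Int) s 0
          ((PySem.List.pyRange 1 ((s.length : Nat) : Int) 1).foldl (fun a i => a + m ^ i.toNat) 0) := by
  cases s with
  | nil => simp [pvLoopA, pvLoopB, PySem.List.pyRange]
  | cons c rest =>
      have hk : (((c :: rest).length : Nat) : Int) = (rest.length : Int) + 1 := by
        simp only [List.length_cons]; push_cast; ring
      rw [hk, pvFoldRange m rest.length 0]
      have he : ((rest.length : Int) + 1 - 1 - 0).toNat = rest.length := by omega
      simp only [pvLoopA, pvLoopB, pvScanA_eq, he, zero_add, mul_one, if_true]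
      by_cases hM : (pvScanB c digits (0, false)).2
      · simp only [if_pos hM]
        apply pvLoop_main
        · omega
        · ring
      · simp only [if_neg hM, pvLoopA_dead]
        ring

theorem pvMain (digits : List String) (n : Int) :
    atMostNGivenDigitSet digits n = atMostNGivenDigitSet_alt digits n :=
  pvMainAux digits (digits.length : Int) ((PySem.Int.toStr n).toList)

-- ===== VERDICT (by name: the statement is the Claim_ definition above) =====
theorem atMostNGivenDigitSet_spec : Claim_equal_atMostNGivenDigitSet := by
  intro digits n _
  unfold Spec_atMostNGivenDigitSet
  exact pvMain digits n
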